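-- pv_equiv track=rewrite | github.com/Amanthegoat007/HR_RAG-Chatbot | services/backend/app/chunker.py | _iter_markdown_blocks
-- ===== SOURCE A (Python) =====
-- def _is_table_line(line: str) -> bool:
--     stripped = line.strip()
--     return stripped.startswith("|") and stripped.endswith("|") and stripped.count("|") >= 3
--
-- def _iter_markdown_blocks(markdown_text: str) -> list[str]:
--     blocks: list[str] = []
--     lines = markdown_text.split("\n")
--     idx = 0
--
--     while idx < len(lines):
--         line = lines[idx]
--         stripped = line.strip()
--
--         if _is_table_line(stripped):
--             table_lines = [stripped]
--             idx += 1
--             while idx < len(lines) and _is_table_line(lines[idx].strip()):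
--                 table_lines.append(lines[idx].strip())
--                 idx += 1
--             blocks.append("\n".join(table_lines))
--             continue
--
--         blocks.append(line)
--         idx += 1
--
--     return blocks
-- ===== SOURCE B (Python) =====
-- def _is_table_line(line: str) -> bool:
--     stripped = line.strip()
--     return stripped.startswith("|") and stripped.endswith("|") and stripped.count("|") >= 3
--
-- def _iter_markdown_blocks(markdown_text: str) -> list[str]:
--     # Pass 1: group consecutive lines into runs keyed by table-ness.
--     runs: list[tuple[bool, list[str]]] = []
--     for line in markdown_text.split("\n"):
--         k = _is_table_line(line.strip())
--         if runs and runs[-1][0] == k: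
--             runs[-1][1].append(line)
--         else:
--             runs.append((k, [line]))
--     # Pass 2: each table run becomes one joined block of stripped lines;
--     # non-table runs contribute their lines verbatim.
--     blocks: list[str] = []
--     for k, group in runs:
--         if k:
--             blocks.append("\n".join(l.strip() for l in group))
--         else:
--             blocks.extend(group)
--     return blocks
-- ===== Notes on version B (the rewrite author's own statement) =====
-- stated objective: alternative
-- what changed: Replaces A's single nested index-advancing while loop by a two-pass run-grouping: pass 1 folds the lines into maximal consecutive runs keyed by table-ness, pass 2 renders each run (table runs join their stripped lines, other runs are emitted verbatim).
import Mathlib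
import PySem

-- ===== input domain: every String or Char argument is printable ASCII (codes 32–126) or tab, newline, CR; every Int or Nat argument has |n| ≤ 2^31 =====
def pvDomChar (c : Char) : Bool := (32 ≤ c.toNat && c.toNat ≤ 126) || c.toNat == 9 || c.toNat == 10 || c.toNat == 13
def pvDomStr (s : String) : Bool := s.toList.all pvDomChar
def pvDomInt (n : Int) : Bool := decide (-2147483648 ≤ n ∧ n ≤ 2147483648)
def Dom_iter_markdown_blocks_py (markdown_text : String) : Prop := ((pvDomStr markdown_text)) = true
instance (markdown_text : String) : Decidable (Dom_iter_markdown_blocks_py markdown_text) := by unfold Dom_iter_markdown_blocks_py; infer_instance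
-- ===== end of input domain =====

-- B replaces A's nested index-advancing while loops by a two-pass run-grouping
-- (build consecutive same-key runs first, then render each run); same output, same cost.

-- ===== PORT A =====
-- _is_table_line (shared helper, used by both Pythons verbatim)
def is_table_line_py (line : String) : Bool :=
  let stripped := PySem.Str.strip line
  PySem.Str.startswith stripped "|" && PySem.Str.endswith stripped "|"
    && decide (3 ≤ PySem.Str.count stripped "|")

-- A's inner 'while idx < len(lines) and _is_table_line(...)': collect stripped table
-- lines, return them together with the remaining lines (the advanced idx).
def tableRunA : List String → List String × List String
  | [] => ([], [])
  | y :: ys =>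
    if is_table_line_py (PySem.Str.strip y) then
      let tr := tableRunA ys
      (PySem.Str.strip y :: tr.1, tr.2)
    else ([], y :: ys)

theorem tableRunA_snd_length_le (l : List String) : (tableRunA l).2.length ≤ l.length := by
  induction l with
  | nil => simp [tableRunA]
  | cons y ys ih =>
    simp only [tableRunA]
    split
    · exact Nat.le_succ_of_le ih
    · simp

-- A's outer while loop over lines
def blocksA : List String → List String
  | [] => []
  | line :: rest =>
    let stripped := PySem.Str.strip line
    if is_table_line_py stripped then
      let tr := tableRunA rest
      PySem.Str.join "\n" (stripped :: tr.1) :: blocksA tr.2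
    else
      line :: blocksA rest
termination_by l => l.length
decreasing_by
  · exact Nat.lt_succ_of_le (tableRunA_snd_length_le rest)
  · simp

def iter_markdown_blocks_py (markdown_text : String) : List String :=
  blocksA ((PySem.Str.split? markdown_text "\n").getD [])

-- ===== PORT B =====
-- Pass 1 step: append the line to the last run if its key matches, else open a new run.
def stepB (runs : List (Bool × List String)) (line : String) : List (Bool × List String) :=
  let k := is_table_line_py (PySem.Str.strip line)
  match runs.getLast? with
  | some (k', g) => if k' == k then runs.dropLast ++ [(k, g ++ [line])] else runs ++ [(k, [line])]
  | none => [(k, [line])]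

def iter_markdown_blocks_py_alt (markdown_text : String) : List String :=
  let lines := (PySem.Str.split? markdown_text "\n").getD []
  let runs := lines.foldl stepB []
  runs.foldl (fun blocks kg =>
    if kg.1 then blocks ++ [PySem.Str.join "\n" (kg.2.map PySem.Str.strip)]
    else blocks ++ kg.2) []

-- ===== PRECONDITION & SPEC =====
def Spec_iter_markdown_blocks_py (markdown_text : String) (out : List String) : Prop := out = iter_markdown_blocks_py_alt markdown_text
instance (markdown_text : String) (out : List String) : Decidable (Spec_iter_markdown_blocks_py markdown_text out) := by unfold Spec_iter_markdown_blocks_py; infer_instance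

-- ===== CLAIM (what is proved, stated in full; the proofs are below) =====
def Claim_equal_iter_markdown_blocks_py : Prop := ∀ (markdown_text : String), Dom_iter_markdown_blocks_py markdown_text → Spec_iter_markdown_blocks_py markdown_text (iter_markdown_blocks_py markdown_text)

-- ===== LEMMAS AND PROOFS =====

-- the grouping key of a line
def keyL (l : String) : Bool := is_table_line_py (PySem.Str.strip l)

-- canonical chunking of the line list into maximal same-key runs
def chunksK : List String → List (Bool × List String)
  | [] => []
  | x :: xs =>
    (keyL x, x :: xs.takeWhile (fun y => keyL y == keyL x))
      :: chunksK (xs.dropWhile (fun y => keyL y == keyL x))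
termination_by l => l.length
decreasing_by
  exact Nat.lt_succ_of_le (xs.length_dropWhile_le _)

-- prepend a run onto a chunk list, merging with the first chunk when keys agree
def glue (k : Bool) (g : List String) : List (Bool × List String) → List (Bool × List String)
  | [] => [(k, g)]
  | (k', g') :: rest => if k = k' then (k, g ++ g') :: rest else (k, g) :: (k', g') :: rest

def render (cs : List (Bool × List String)) : List String :=
  cs.flatMap (fun c => if c.1 then [PySem.Str.join "\n" (c.2.map PySem.Str.strip)] else c.2)

theorem tableRunA_eq (l : List String) :
    tableRunA l = ((l.takeWhile keyL).map PySem.Str.strip, l.dropWhile keyL) := by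
  induction l with
  | nil => simp [tableRunA]
  | cons y ys ih =>
    simp only [tableRunA, List.takeWhile, List.dropWhile, keyL] at *
    by_cases h : is_table_line_py (PySem.Str.strip y) <;> simp [h, ih]

theorem glue_cons (x : String) (xs : List String) :
    glue (keyL x) [x] (chunksK xs) = chunksK (x :: xs) := by
  cases xs with
  | nil => simp [chunksK, glue]
  | cons y ys =>
    rw [chunksK, chunksK]
    by_cases h : keyL y = keyL x
    · rw [h]
      simp [glue, h.symm, List.takeWhile, List.dropWhile]
    · have h' : (keyL y == keyL x) = false := by simp [h]
      simp [glue, List.takeWhile, List.dropWhile, h', Ne.symm h, chunksK]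

theorem glue_snoc (k : Bool) (g : List String) (x : String) (cs : List (Bool × List String)) :
    glue k (g ++ [x]) cs = glue k g (glue k [x] cs) := by
  cases cs with
  | nil => simp [glue]
  | cons c rest =>
    obtain ⟨k', g'⟩ := c
    by_cases h : k = k' <;> simp [glue, h]

theorem foldl_stepB (l : List String) (acc : List (Bool × List String)) (k : Bool)
    (g : List String) :
    List.foldl stepB (acc ++ [(k, g)]) l = acc ++ glue k g (chunksK l) := by
  induction l generalizing acc k g with
  | nil => simp [chunksK, glue]
  | cons x xs ih =>
    rw [List.foldl_cons]
    show List.foldl stepB (stepB (acc ++ [(k, g)]) x) xs = _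
    rw [stepB]
    simp only [List.getLast?_concat, List.dropLast_concat]
    have hx : is_table_line_py (PySem.Str.strip x) = keyL x := rfl
    by_cases hk : k = keyL x
    · rw [hx, beq_iff_eq.mpr hk]
      simp only [if_true]
      rw [ih, glue_snoc, hk, glue_cons]
    · rw [hx, beq_eq_false_iff_ne.mpr hk]
      simp only [Bool.false_eq_true, if_false]
      rw [ih, glue_cons]
      rw [chunksK]
      simp [glue, hk]

theorem foldl_stepB_nil (l : List String) : List.foldl stepB [] l = chunksK l := by
  cases l with
  | nil => simp [chunksK]
  | cons x xs =>
    rw [List.foldl_cons]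
    have h1 : stepB [] x = [] ++ [(keyL x, [x])] := rfl
    rw [h1, foldl_stepB, glue_cons, List.nil_append]

theorem render_chunksK_cons_false (x : String) (xs : List String) (h : keyL x = false) :
    render (chunksK (x :: xs)) = x :: render (chunksK xs) := by
  cases xs with
  | nil => simp [chunksK, render, h]
  | cons y ys =>
    by_cases hy : keyL y = keyL x
    · rw [chunksK, chunksK, hy, h]
      simp [render, List.takeWhile, List.dropWhile, h, hy]
    · conv_lhs => rw [chunksK]
      have hy2 : keyL y = true := by
        rw [h] at hy; cases hk : keyL y <;> simp [hk] at hy ⊢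
      simp [render, List.takeWhile, List.dropWhile, hy2, h]

theorem blocksA_eq_aux : ∀ (n : Nat) (l : List String), l.length ≤ n → blocksA l = render (chunksK l) := by
  intro n
  induction n with
  | zero =>
    intro l h
    have : l = [] := List.eq_nil_of_length_eq_zero (Nat.le_zero.mp h)
    subst this
    simp [blocksA, chunksK, render]
  | succ n ih =>
    intro l h
    match l with
    | [] => simp [blocksA, chunksK, render]
    | x :: xs =>
      simp only [blocksA, tableRunA_eq]
      by_cases hx : keyL x = true
      · simp only [show is_table_line_py (PySem.Str.strip x) = true from hx, if_true]
        rw [chunksK]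
        have hp : (fun y => keyL y == keyL x) = keyL := by
          funext y; rw [show keyL x = true from hx]; simp
        rw [hp]
        simp only [render, List.flatMap_cons, hx, if_true, List.map_cons]
        rw [ih (xs.dropWhile keyL) (by
          have := xs.length_dropWhile_le keyL
          simp at h; omega)]
        simp [render]
      · have hx' : keyL x = false := by simpa using hx
        simp only [show is_table_line_py (PySem.Str.strip x) = false from hx',
          Bool.false_eq_true, if_false]
        rw [render_chunksK_cons_false x xs hx']
        rw [ih xs (by simp at h; omega)]

theorem blocksA_eq (l : List String) : blocksA l = render (chunksK l) :=
  blocksA_eq_aux l.length l (Nat.le_refl _)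

-- ===== VERDICT (by name: the statement is the Claim_ definition above) =====
theorem iter_markdown_blocks_py_spec : Claim_equal_iter_markdown_blocks_py := by
  intro m _
  unfold Spec_iter_markdown_blocks_py
  simp only [iter_markdown_blocks_py, iter_markdown_blocks_py_alt]
  rw [blocksA_eq, foldl_stepB_nil]
  generalize chunksK ((PySem.Str.split? m "\n").getD []) = cs
  induction cs using List.reverseRecOn with
  | nil => simp [render]
  | append_singleton cs c ih =>
    rw [List.foldl_append, List.foldl_cons, List.foldl_nil, ← ih]
    simp only [render, List.flatMap_append, List.flatMap_cons, List.flatMap_nil, List.append_nil]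
    split <;> rfl
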